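-- pv_equiv track=rewrite | github.com/KimGeunUk/Algorithm-Study | 파이썬을 파이썬답게/알파벳 출력하기.py | solution
-- ===== SOURCE A (Python) =====
-- def solution(str1):
--     answer = ''
--     for i in range(26):
--         answer += chr(i+65)
--
--     if str1 == 0:
--         answer = answer.lower()
--     else:
--         answer = answer.upper()
--
--     return answer
-- ===== SOURCE B (Python) =====
-- import string
--
-- def solution(str1):
--     return string.ascii_lowercase if str1 == 0 else string.ascii_uppercase
-- ===== Notes on version B (the rewrite author's own statement) =====
-- stated objective: simpler
-- what changed: Replaces the per-letter chr-concatenation build loop plus lower()/upper() post-pass with a direct branch returning a closed-form alphabet constant (string.ascii_lowercase/ascii_uppercase).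
import Mathlib
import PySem

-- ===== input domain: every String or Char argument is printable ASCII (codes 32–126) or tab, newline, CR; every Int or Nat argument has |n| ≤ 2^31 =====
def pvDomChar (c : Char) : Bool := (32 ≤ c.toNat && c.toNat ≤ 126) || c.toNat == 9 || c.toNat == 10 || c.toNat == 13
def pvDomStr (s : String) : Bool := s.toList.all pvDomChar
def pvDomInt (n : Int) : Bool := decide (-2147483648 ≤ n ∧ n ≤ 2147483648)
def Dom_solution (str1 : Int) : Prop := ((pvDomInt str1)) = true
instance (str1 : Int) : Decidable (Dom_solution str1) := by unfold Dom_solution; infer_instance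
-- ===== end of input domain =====

-- B replaces A's 26-iteration build loop + lower/upper pass with a branch returning a closed-form alphabet constant (simpler).

-- ===== PORT A =====
-- answer = ''; for i in range(26): answer += chr(i+65)
def solution (str1 : Int) : String :=
  let answer := (PySem.List.pyRange 0 26 1).foldl
    (fun acc i => acc ++ String.ofList [Char.ofNat (i + 65).toNat]) ""
  if str1 == 0 then PySem.Str.lower answer else PySem.Str.upper answer

-- ===== PORT B =====
def solution_alt (str1 : Int) : String :=
  if str1 == 0 then "abcdefghijklmnopqrstuvwxyz" else "ABCDEFGHIJKLMNOPQRSTUVWXYZ"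

-- ===== PRECONDITION & SPEC =====
def Spec_solution (str1 : Int) (out : String) : Prop := out = solution_alt str1
instance (str1 : Int) (out : String) : Decidable (Spec_solution str1 out) := by unfold Spec_solution; infer_instance

-- ===== CLAIM (what is proved, stated in full; the proofs are below) =====
def Claim_equal_solution : Prop := ∀ (str1 : Int), Dom_solution str1 → Spec_solution str1 (solution str1)

-- ===== LEMMAS AND PROOFS =====

-- ===== VERDICT (by name: the statement is the Claim_ definition above) =====
theorem solution_spec : Claim_equal_solution := by
  intro str1 _
  unfold Spec_solution solution solution_alt
  by_cases h : str1 = 0 <;> simp [h] <;> decide
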